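-- pv_equiv track=rewrite | github.com/MathRdt/advent-of-code | src/2023/13/part_one.py | get_mirroring_index
-- ===== SOURCE A (Python) =====
-- def get_mirroring_index(model):
--     model_len = len(model)
--     starting_index = 0
--     is_mirroring = False
--     while starting_index < model_len and is_mirroring == False:
--         diff_index = 1
--         while starting_index - diff_index >= 0 and starting_index + diff_index - 1 < model_len:
--             if model[starting_index + diff_index - 1] != model[starting_index - diff_index]:
--                 is_mirroring = False
--                 break
--             diff_index += 1
--             is_mirroring = True
--         starting_index += 1
--     if is_mirroring == False:
--         return None
--     return starting_index - 1
-- ===== SOURCE B (Python) =====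
-- def _z(t):
--     # Z-array: z[i] = length of the longest common prefix of t[i:] and t
--     n = len(t)
--     z = [0] * n
--     if n:
--         z[0] = n
--     l = r = 0
--     for i in range(1, n):
--         k = min(r - i, z[i - l]) if i < r else 0
--         while i + k < n and t[k] == t[i + k]:
--             k += 1
--         z[i] = k
--         if i + k > r:
--             l, r = i, i + k
--     return z
--
--
-- def _even_pal(seq):
--     # flags[s] True iff seq[:2*s] is a palindrome, for 1 <= s <= len(seq)//2
--     n = len(seq)
--     t = list(seq) + [None] + list(reversed(seq))
--     z = _z(t)
--     return [False] + [z[2 * n + 1 - 2 * s] == 2 * s for s in range(1, n // 2 + 1)]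
--
--
-- def get_mirroring_index(model):
--     # axis at s <= n/2  <=>  prefix of length 2s is a palindrome;
--     # axis at s > n/2   <=>  suffix of length 2(n-s) is a palindrome
--     n = len(model)
--     pref = _even_pal(model)
--     suf = _even_pal(model[::-1])
--     for s in range(1, n):
--         ok = pref[s] if 2 * s <= n else suf[n - s]
--         if ok:
--             return s
--     return None
-- ===== Notes on version B (the rewrite author's own statement) =====
-- stated objective: alternative
-- what changed: B reduces the problem to even-palindromic prefixes/suffixes and detects them all at once with a single Z-algorithm pass over seq+sentinel+reversed(seq), instead of A's nested while-loops that verify each candidate axis by outward pairwise row comparison; B does O(n) row comparisons worst case versus A's O(n^2), though on random inputs (where A's inner loop exits immediately) a timing run shows no speed-up.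
import Mathlib
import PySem

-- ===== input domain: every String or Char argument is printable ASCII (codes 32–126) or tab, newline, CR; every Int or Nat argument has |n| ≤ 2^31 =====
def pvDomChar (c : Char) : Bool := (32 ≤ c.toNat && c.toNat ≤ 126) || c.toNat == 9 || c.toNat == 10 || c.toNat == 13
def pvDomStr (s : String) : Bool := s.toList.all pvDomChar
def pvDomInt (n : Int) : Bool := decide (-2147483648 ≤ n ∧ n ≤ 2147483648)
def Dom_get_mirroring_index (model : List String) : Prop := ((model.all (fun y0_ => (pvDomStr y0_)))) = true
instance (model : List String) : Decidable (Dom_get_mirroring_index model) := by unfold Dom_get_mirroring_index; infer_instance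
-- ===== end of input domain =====

-- B replaces A's nested axis-by-axis verification with a single Z-algorithm pass that detects
-- all even-palindromic prefixes/suffixes at once (a genuinely different algorithm of similar measured cost).

-- ===== PORT A =====
-- inner while loop: state (diff_index, is_mirroring); fuel bounds the iteration count (provably sufficient)
def pvInnerA (model : List String) (n s : Int) : Nat → Int → Bool → Bool
  | 0, _, m => m
  | fuel + 1, d, m =>
    if 0 ≤ s - d ∧ s + d - 1 < n then
      if PySem.List.pyGet? model (s + d - 1) ≠ PySem.List.pyGet? model (s - d) then
        false
      else
        pvInnerA model n s fuel (d + 1) true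
    else m

-- outer while loop: state (starting_index, is_mirroring)
def pvOuterA (model : List String) (n : Int) : Nat → Int → Bool → Int × Bool
  | 0, s, m => (s, m)
  | fuel + 1, s, m =>
    if s < n ∧ m = false then
      pvOuterA model n fuel (s + 1) (pvInnerA model n s (model.length + 1) 1 m)
    else (s, m)

def get_mirroring_index (model : List String) : Option Int :=
  let n : Int := model.length
  let r := pvOuterA model n (model.length + 1) 0 false
  if r.2 = false then none else some (r.1 - 1)

-- ===== PORT B =====
-- Every Python int in B is a loop counter or index that is provably nonnegative, so Nat is exact
-- here; the Nat subtractions r-i and n-s only occur under the guards i<r resp. s<n, matching Python.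

-- the `while i + k < n and t[k] == t[i + k]: k += 1` extension loop of _z
def pvLcpExt (t : List (Option String)) (i : Nat) (k : Nat) : Nat :=
  if h : i + k < t.length ∧ t.getD k none = t.getD (i + k) none then
    pvLcpExt t i (k + 1)
  else k
termination_by t.length - (i + k)
decreasing_by have := h.1; omega

-- the `for i in range(1, n)` loop of _z; state (z, l, r)
def pvZLoop (t : List (Option String)) (n : Nat) (i : Nat) (z : List Nat) (l r : Nat) : List Nat :=
  if h : i < n then
    let k0 := if i < r then min (r - i) (z.getD (i - l) 0) else 0
    let k := pvLcpExt t i k0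
    let z' := z.set i k
    if r < i + k then pvZLoop t n (i + 1) z' i (i + k)
    else pvZLoop t n (i + 1) z' l r
  else z
termination_by n - i
decreasing_by all_goals omega

def pvZ (t : List (Option String)) : List Nat :=
  let n := t.length
  let z0 := List.replicate n 0
  let z1 := if n ≠ 0 then z0.set 0 n else z0
  pvZLoop t n 1 z1 0 0

-- _even_pal: flags[s] for s = 0 .. n//2; sentinel None becomes `none`
def pvEvenPal (seq : List String) : List Bool :=
  let n := seq.length
  let t := seq.map some ++ [none] ++ seq.reverse.map some
  let z := pvZ t
  false :: (List.range' 1 (n / 2)).map (fun s => z.getD (2 * n + 1 - 2 * s) 0 == 2 * s)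

-- the `for s in range(1, n)` answer loop
def pvFindAxis (n : Nat) (pref suf : List Bool) (s : Nat) : Option Int :=
  if h : s < n then
    let ok := if 2 * s ≤ n then pref.getD s false else suf.getD (n - s) false
    if ok then some (s : Int) else pvFindAxis n pref suf (s + 1)
  else none
termination_by n - s

def get_mirroring_index_alt (model : List String) : Option Int :=
  let n := model.length
  let pref := pvEvenPal model
  let suf := pvEvenPal model.reverse
  pvFindAxis n pref suf 1

-- ===== PRECONDITION & SPEC =====
def Spec_get_mirroring_index (model : List String) (out : Option Int) : Prop := out = get_mirroring_index_alt model
instance (model : List String) (out : Option Int) : Decidable (Spec_get_mirroring_index model out) := by unfold Spec_get_mirroring_index; infer_instance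

-- ===== CLAIM (what is proved, stated in full; the proofs are below) =====
def Claim_equal_get_mirroring_index : Prop := ∀ (model : List String), Dom_get_mirroring_index model → Spec_get_mirroring_index model (get_mirroring_index model)

-- ===== LEMMAS AND PROOFS =====

-- longest common prefix (proof-side characterisation of pvLcpExt / the Z-values)
def pvLcp : List (Option String) → List (Option String) → Nat
  | a :: as, b :: bs => if a = b then pvLcp as bs + 1 else 0
  | _, _ => 0

lemma pvLcp_nil_left (ys : List (Option String)) : pvLcp [] ys = 0 := by cases ys <;> rfl

lemma pvLcp_le_left : ∀ (xs ys : List (Option String)), pvLcp xs ys ≤ xs.length := by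
  intro xs
  induction xs with
  | nil => intro ys; simp [pvLcp_nil_left]
  | cons a as ih =>
    intro ys
    cases ys with
    | nil => simp [pvLcp]
    | cons b bs =>
      rw [pvLcp]
      split_ifs
      · have := ih bs; simp; omega
      · simp

lemma pvLcp_refl : ∀ (t : List (Option String)), pvLcp t t = t.length := by
  intro t
  induction t with
  | nil => rfl
  | cons a as ih => simp [pvLcp, ih]

lemma pvLcp_le_iff : ∀ (xs ys : List (Option String)) (k : Nat),
    k ≤ pvLcp xs ys ↔
      k ≤ xs.length ∧ k ≤ ys.length ∧ ∀ j, j < k → xs.getD j none = ys.getD j none := by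
  intro xs
  induction xs with
  | nil =>
    intro ys k
    rw [pvLcp_nil_left]
    simp only [List.length_nil, Nat.le_zero]
    constructor
    · rintro rfl; exact ⟨rfl, Nat.zero_le _, by omega⟩
    · rintro ⟨rfl, -, -⟩; rfl
  | cons a as ih =>
    intro ys k
    cases ys with
    | nil =>
      simp only [pvLcp, List.length_nil, Nat.le_zero]
      constructor
      · rintro rfl; exact ⟨Nat.zero_le _, rfl, by omega⟩
      · rintro ⟨-, rfl, -⟩; rfl
    | cons b bs =>
      cases k with
      | zero => simp
      | succ k' =>
        rw [pvLcp]
        by_cases hab : a = b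
        · rw [if_pos hab]
          rw [Nat.succ_le_succ_iff, ih bs k']
          subst hab
          constructor
          · rintro ⟨h1, h2, h3⟩
            refine ⟨by simpa using h1, by simpa using h2, ?_⟩
            intro j hj
            cases j with
            | zero => simp
            | succ j' => simpa using h3 j' (by omega)
          · rintro ⟨h1, h2, h3⟩
            refine ⟨by simpa using h1, by simpa using h2, ?_⟩
            intro j hj
            simpa using h3 (j + 1) (by omega)
        · rw [if_neg hab]
          constructor
          · intro h; omega
          · rintro ⟨-, -, h3⟩
            exact absurd (by simpa using h3 0 (by omega)) hab

lemma pvLcp_getD (xs ys : List (Option String)) (j : Nat) (hj : j < pvLcp xs ys) :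
    xs.getD j none = ys.getD j none :=
  ((pvLcp_le_iff xs ys (pvLcp xs ys)).mp le_rfl).2.2 j hj

lemma pvGetD_drop (t : List (Option String)) (i j : Nat) :
    (t.drop i).getD j none = t.getD (i + j) none := by
  simp [List.getD_eq_getElem?_getD, List.getElem?_drop]

lemma pvLcpExt_eq (t : List (Option String)) (i : Nat) :
    ∀ (k : Nat), k ≤ pvLcp (t.drop i) t → pvLcpExt t i k = pvLcp (t.drop i) t := by
  intro k
  induction k using pvLcpExt.induct t i with
  | case1 k h ih =>
    intro hk
    rw [pvLcpExt, dif_pos h]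
    apply ih
    rw [pvLcp_le_iff]
    obtain ⟨h1, h2, h3⟩ := (pvLcp_le_iff _ _ k).mp hk
    refine ⟨by simp; omega, by omega, ?_⟩
    intro j hj
    rcases Nat.lt_or_ge j k with hlt | hge
    · exact h3 j hlt
    · have hjk : j = k := by omega
      subst hjk
      rw [pvGetD_drop]
      exact h.2.symm
  | case2 k h =>
    intro hk
    rw [pvLcpExt, dif_neg h]
    refine le_antisymm hk ?_
    by_contra hlt
    have hlt' : k + 1 ≤ pvLcp (t.drop i) t := by omega
    obtain ⟨h1, h2, h3⟩ := (pvLcp_le_iff _ _ (k + 1)).mp hlt'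
    have hkk := h3 k (by omega)
    rw [pvGetD_drop] at hkk
    simp only [List.length_drop] at h1
    exact h ⟨by omega, hkk.symm⟩


lemma pvGetD_set_self (z : List Nat) (i k : Nat) (h : i < z.length) :
    (z.set i k).getD i 0 = k := by
  simp [List.getD_eq_getElem?_getD, h]

lemma pvGetD_set_ne (z : List Nat) (i k j : Nat) (h : j ≠ i) :
    (z.set i k).getD j 0 = z.getD j 0 := by
  simp [List.getD_eq_getElem?_getD, List.getElem?_set_ne (Ne.symm h)]

-- loop invariant of the Z-algorithm: every stored z-value is the true lcp with the prefix,
-- and [l, r) is a matching window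
lemma pvZLoop_spec (t : List (Option String)) (n : Nat) (hn : n = t.length) :
    ∀ (fuel i : Nat) (z : List Nat) (l r : Nat), n - i ≤ fuel → 1 ≤ i → z.length = n →
    (∀ j, j < i → z.getD j 0 = pvLcp (t.drop j) t) →
    l < i → r ≤ l + pvLcp (t.drop l) t → r ≤ n → (r ≤ i ∨ 1 ≤ l) →
    ∀ j, (pvZLoop t n i z l r).getD j 0 = pvLcp (t.drop j) t := by
  intro fuel
  induction fuel with
  | zero =>
    intro i z l r hfuel h1 hlen hz hl hwin hrn hcase j
    have hin : ¬ i < n := by omega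
    rw [pvZLoop, dif_neg hin]
    rcases Nat.lt_or_ge j i with hj | hj
    · exact hz j hj
    · have hjn : t.length ≤ j := by omega
      rw [List.getD_eq_default _ _ (by omega), List.drop_eq_nil_of_le hjn, pvLcp_nil_left]
  | succ fuel ih =>
    intro i z l r hfuel h1 hlen hz hl hwin hrn hcase j
    by_cases hin : i < n
    · rw [pvZLoop, dif_pos hin]
      dsimp only
      -- the clipped start k0 is a valid partial match
      have hk0 : (if i < r then min (r - i) (z.getD (i - l) 0) else 0) ≤ pvLcp (t.drop i) t := by
        split_ifs with hir
        · have hl1 : 1 ≤ l := by omega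
          have hil : i - l < i := by omega
          have hzil := hz (i - l) hil
          rw [pvLcp_le_iff]
          refine ⟨by simp; omega, by omega, ?_⟩
          intro j' hj'
          have hj1 : j' < r - i := by omega
          have hj2 : j' < pvLcp (t.drop (i - l)) t := by rw [← hzil]; omega
          have e1 := pvLcp_getD (t.drop l) t ((i - l) + j')
            (by have := hwin; omega)
          rw [pvGetD_drop] at e1
          have e2 := pvLcp_getD (t.drop (i - l)) t j' hj2
          rw [pvGetD_drop] at e2
          rw [pvGetD_drop]
          have hidx : l + (i - l + j') = i + j' := by omega
          rw [hidx] at e1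
          rw [e1, e2]
        · exact Nat.zero_le _
      have hkeq : pvLcpExt t i (if i < r then min (r - i) (z.getD (i - l) 0) else 0) =
          pvLcp (t.drop i) t := pvLcpExt_eq t i _ hk0
      rw [hkeq]
      have hkle : pvLcp (t.drop i) t ≤ n - i := by
        have := pvLcp_le_left (t.drop i) t
        simp only [List.length_drop] at this
        omega
      have hz' : ∀ j', j' < i + 1 →
          (z.set i (pvLcp (t.drop i) t)).getD j' 0 = pvLcp (t.drop j') t := by
        intro j' hj'
        rcases Nat.lt_or_ge j' i with hlt | hge
        · rw [pvGetD_set_ne _ _ _ _ (by omega)]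
          exact hz j' hlt
        · have hji : j' = i := by omega
          rw [hji]
          exact pvGetD_set_self z i _ (by omega)
      have hlen' : (z.set i (pvLcp (t.drop i) t)).length = n := by
        rw [List.length_set]; exact hlen
      split_ifs with hbr
      · exact ih (i + 1) _ i (i + pvLcp (t.drop i) t) (by omega) (by omega) hlen' hz'
          (by omega) le_rfl (by omega) (Or.inr (by omega)) j
      · exact ih (i + 1) _ l r (by omega) (by omega) hlen' hz'
          (by omega) hwin hrn (by omega) j
    · rw [pvZLoop, dif_neg hin]
      rcases Nat.lt_or_ge j i with hj | hj
      · exact hz j hj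
      · have hjn : t.length ≤ j := by omega
        rw [List.getD_eq_default _ _ (by omega), List.drop_eq_nil_of_le hjn, pvLcp_nil_left]

lemma pvZ_spec (t : List (Option String)) (j : Nat) :
    (pvZ t).getD j 0 = pvLcp (t.drop j) t := by
  unfold pvZ
  dsimp only
  apply pvZLoop_spec t t.length rfl (t.length - 1 + 1) 1 _ 0 0 (by omega) le_rfl
  · split_ifs with h0
    · rw [List.length_set, List.length_replicate]
    · rw [List.length_replicate]
  · intro j' hj'
    have : j' = 0 := by omega
    subst this
    split_ifs with h0
    · rw [pvGetD_set_self _ _ _ (by simp; omega), List.drop_zero, pvLcp_refl]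
    · have ht : t = [] := List.eq_nil_of_length_eq_zero (by omega)
      subst ht
      simp [pvLcp_nil_left]
  · omega
  · simp
  · omega
  · left; omega

lemma pvT_length (seq : List String) :
    (seq.map some ++ [none] ++ seq.reverse.map some).length = 2 * seq.length + 1 := by
  simp only [List.length_append, List.length_map, List.length_reverse, List.length_cons,
    List.length_nil]
  omega

lemma pvT_getD_left (seq : List String) (j : Nat) (hj : j < seq.length) :
    (seq.map some ++ [none] ++ seq.reverse.map some).getD j none = some (seq.getD j "") := by
  rw [List.getD_eq_getElem?_getD,
    List.getElem?_append_left (by simp only [List.length_append, List.length_map,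
      List.length_cons, List.length_nil]; omega),
    List.getElem?_append_left (by simpa using hj),
    List.getElem?_map, List.getElem?_eq_getElem hj]
  simp [List.getD_eq_getElem?_getD, List.getElem?_eq_getElem hj]

lemma pvT_getD_right (seq : List String) (m : Nat) (hm : m < seq.length) :
    (seq.map some ++ [none] ++ seq.reverse.map some).getD (seq.length + 1 + m) none
      = some (seq.getD (seq.length - 1 - m) "") := by
  rw [List.getD_eq_getElem?_getD,
    List.getElem?_append_right (by simp only [List.length_append, List.length_map,
      List.length_cons, List.length_nil]; omega)]
  have hidx : seq.length + 1 + m - (seq.map some ++ [none]).length = m := by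
    simp only [List.length_append, List.length_map, List.length_cons, List.length_nil]; omega
  rw [hidx, List.getElem?_map, List.getElem?_reverse (by simpa using hm)]
  rw [List.getElem?_eq_getElem (by omega)]
  simp [List.getD_eq_getElem?_getD, List.getElem?_eq_getElem (show seq.length - 1 - m < seq.length by omega)]

-- the Z-value read off by _even_pal says exactly "the prefix of length 2s is a palindrome"
lemma pvLcp_pal (seq : List String) (s : Nat) (h1 : 1 ≤ s) (h2 : 2 * s ≤ seq.length) :
    (pvLcp ((seq.map some ++ [none] ++ seq.reverse.map some).drop (2 * seq.length + 1 - 2 * s))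
        (seq.map some ++ [none] ++ seq.reverse.map some) = 2 * s)
    ↔ ∀ j, j < 2 * s → seq.getD (2 * s - 1 - j) "" = seq.getD j "" := by
  set n := seq.length with hn
  set t := seq.map some ++ [none] ++ seq.reverse.map some with ht
  have htlen : t.length = 2 * n + 1 := pvT_length seq
  have hdlen : (t.drop (2 * n + 1 - 2 * s)).length = 2 * s := by
    rw [List.length_drop, htlen]; omega
  have hub : pvLcp (t.drop (2 * n + 1 - 2 * s)) t ≤ 2 * s := by
    have := pvLcp_le_left (t.drop (2 * n + 1 - 2 * s)) t
    omega
  have hpoint : ∀ j, j < 2 * s →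
      ((t.drop (2 * n + 1 - 2 * s)).getD j none = t.getD j none ↔
        seq.getD (2 * s - 1 - j) "" = seq.getD j "") := by
    intro j hj
    rw [pvGetD_drop]
    have hidx : 2 * n + 1 - 2 * s + j = n + 1 + (n - 2 * s + j) := by omega
    rw [hidx, pvT_getD_right seq (n - 2 * s + j) (by omega),
      pvT_getD_left seq j (by omega)]
    have hidx2 : n - 1 - (n - 2 * s + j) = 2 * s - 1 - j := by omega
    rw [hidx2, Option.some_inj]
  constructor
  · intro heq j hj
    exact (hpoint j hj).mp (pvLcp_getD _ _ j (by omega))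
  · intro hpal
    have hge : 2 * s ≤ pvLcp (t.drop (2 * n + 1 - 2 * s)) t := by
      rw [pvLcp_le_iff]
      refine ⟨by omega, by omega, ?_⟩
      intro j hj
      exact (hpoint j hj).mpr (hpal j hj)
    omega

lemma pvEvenPal_getD (seq : List String) (s : Nat) (h1 : 1 ≤ s) (h2 : 2 * s ≤ seq.length) :
    ((pvEvenPal seq).getD s false = true) ↔
      ∀ j, j < 2 * s → seq.getD (2 * s - 1 - j) "" = seq.getD j "" := by
  unfold pvEvenPal
  dsimp only
  obtain ⟨s', rfl⟩ : ∃ s', s = s' + 1 := ⟨s - 1, by omega⟩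
  rw [List.getD_cons_succ]
  have hs' : s' < seq.length / 2 := by omega
  rw [List.getD_eq_getElem?_getD, List.getElem?_map,
    List.getElem?_eq_getElem (by simpa using hs')]
  simp only [List.getElem_range', Option.map_some, Option.getD_some]
  rw [pvZ_spec, beq_iff_eq]
  have hsame : 1 + 1 * s' = s' + 1 := by omega
  rw [hsame]
  exact pvLcp_pal seq (s' + 1) (by omega) h2

-- mirror predicate characterising A's inner loop from offset d
def pvGood (model : List String) (n s d : Int) : Prop :=
  ∀ e : Int, d ≤ e → 0 ≤ s - e → s + e - 1 < n →
    PySem.List.pyGet? model (s + e - 1) = PySem.List.pyGet? model (s - e)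

lemma pvInnerA_stop (model : List String) (n s : Int) (f : Nat) (d : Int) (m : Bool)
    (hf : 1 ≤ f) (h : ¬ (0 ≤ s - d ∧ s + d - 1 < n)) :
    pvInnerA model n s f d m = m := by
  cases f with
  | zero => omega
  | succ f => rw [pvInnerA, if_neg h]

lemma pvInnerA_true_iff (model : List String) (n s : Int) :
    ∀ (f : Nat) (d : Int) (m : Bool), (0 ≤ s - d ∧ s + d - 1 < n) → (n - s - d + 1).toNat < f →
    (pvInnerA model n s f d m = true ↔ pvGood model n s d) := by
  intro f
  induction f with
  | zero => intro d m hb hf; omega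
  | succ f ih =>
    intro d m hb hf
    rw [pvInnerA, if_pos hb]
    by_cases hne : PySem.List.pyGet? model (s + d - 1) = PySem.List.pyGet? model (s - d)
    · rw [if_neg (not_not_intro hne)]
      by_cases hb2 : (0 ≤ s - (d + 1) ∧ s + (d + 1) - 1 < n)
      · rw [ih (d + 1) true hb2 (by omega)]
        constructor
        · intro hg e he h1 h2
          rcases eq_or_lt_of_le he with rfl | hlt
          · exact hne
          · exact hg e (by omega) h1 h2
        · intro hg e he h1 h2
          exact hg e (by omega) h1 h2
      · rw [pvInnerA_stop model n s f (d + 1) true (by omega) hb2]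
        simp only [true_iff]
        intro e he h1 h2
        rcases eq_or_lt_of_le he with rfl | hlt
        · exact hne
        · exact absurd ⟨by omega, by omega⟩ hb2
    · rw [if_pos hne]
      constructor
      · intro h; exact absurd h (by simp)
      · intro hg; exact absurd (hg d le_rfl hb.1 hb.2) hne

lemma pvOuterA_stop (model : List String) (n : Int) (f : Nat) (s : Int) (hf : 1 ≤ f) :
    pvOuterA model n f s true = (s, true) := by
  cases f with
  | zero => omega
  | succ f => simp [pvOuterA]

lemma pvOuterA_find (model : List String) (p : Int → Bool)
    (hpred : ∀ s : Int, 1 ≤ s → s < (model.length : Int) →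
      pvInnerA model (model.length : Int) s (model.length + 1) 1 false = p s) :
    ∀ (f : Nat) (s : Int), 1 ≤ s → s ≤ (model.length : Int) → ((model.length : Int) - s).toNat < f →
    pvOuterA model (model.length : Int) f s false =
      match (PySem.List.pyRange s (model.length : Int) 1).find? p with
      | some t => (t + 1, true)
      | none => ((model.length : Int), false) := by
  intro f
  induction f with
  | zero => intro s hs1 hs2 hf; omega
  | succ f ih =>
    intro s hs1 hs2 hf
    by_cases hs : s < (model.length : Int)
    · rw [PySem.List.pyRange_one_cons hs, pvOuterA, if_pos ⟨hs, rfl⟩,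
          hpred s hs1 hs, List.find?_cons]
      cases hc : p s
      · exact ih (s + 1) (by omega) (by omega) (by omega)
      · exact pvOuterA_stop model (model.length : Int) f (s + 1) (by omega)
    · have hsn : s = (model.length : Int) := by omega
      rw [PySem.List.pyRange_one_eq_nil (by omega), pvOuterA,
          if_neg (by simp [hs]), hsn]
      simp only [List.find?_nil]

-- Nat-indexed mirror condition (what B's palindrome tests decide)
def pvGoodNat (model : List String) (s : Nat) : Prop :=
  ∀ d : Nat, d < min s (model.length - s) →
    model.getD (s + d) "" = model.getD (s - 1 - d) ""

lemma pvPyGet_getD (l : List String) (i : Int) (h0 : 0 ≤ i) (h1 : i < (l.length : Int)) :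
    PySem.List.pyGet? l i = some (l.getD i.toNat "") := by
  rw [PySem.List.pyGet?_of_nonneg l h0,
    List.getElem?_eq_getElem (by omega), List.getD_eq_getElem _ _ (by omega)]

lemma pvGood_iff_goodNat (model : List String) (s : Nat) (h1 : 1 ≤ s)
    (h2 : s < model.length) :
    (pvGood model (model.length : Int) (s : Int) 1 ↔ pvGoodNat model s) := by
  constructor
  · intro hg d hd
    have he := hg ((d : Int) + 1) (by omega) (by omega) (by omega)
    rw [pvPyGet_getD model _ (by omega) (by omega),
        pvPyGet_getD model _ (by omega) (by omega), Option.some_inj] at he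
    have e1 : ((s : Int) + ((d : Int) + 1) - 1).toNat = s + d := by omega
    have e2 : ((s : Int) - ((d : Int) + 1)).toNat = s - 1 - d := by omega
    rw [e1, e2] at he
    exact he
  · intro hg e he1 he2 he3
    have hd : e.toNat - 1 < min s (model.length - s) := by omega
    have := hg (e.toNat - 1) hd
    rw [pvPyGet_getD model _ (by omega) (by omega),
        pvPyGet_getD model _ (by omega) (by omega), Option.some_inj]
    have e1 : ((s : Int) + e - 1).toNat = s + (e.toNat - 1) := by omega
    have e2 : ((s : Int) - e).toNat = s - 1 - (e.toNat - 1) := by omega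
    rw [e1, e2]
    exact this

-- prefix palindrome (axis in the left half) ↔ mirror condition
lemma pvPal_low (model : List String) (s : Nat) (h2 : 2 * s ≤ model.length) :
    (∀ j, j < 2 * s → model.getD (2 * s - 1 - j) "" = model.getD j "") ↔
      pvGoodNat model s := by
  constructor
  · intro hp d hd
    have hds : d < s := by omega
    have := hp (s + d) (by omega)
    have e1 : 2 * s - 1 - (s + d) = s - 1 - d := by omega
    rw [e1] at this
    exact this.symm
  · intro hg j hj
    have hmin : min s (model.length - s) = s := by omega
    rcases Nat.lt_or_ge j s with hjs | hjs
    · have := hg (s - 1 - j) (by omega)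
      have e1 : s + (s - 1 - j) = 2 * s - 1 - j := by omega
      have e2 : s - 1 - (s - 1 - j) = j := by omega
      rw [e1, e2] at this
      exact this
    · have := hg (j - s) (by omega)
      have e1 : s + (j - s) = j := by omega
      have e2 : s - 1 - (j - s) = 2 * s - 1 - j := by omega
      rw [e1, e2] at this
      exact this.symm

lemma pvRev_getD (l : List String) (j : Nat) (hj : j < l.length) :
    l.reverse.getD j "" = l.getD (l.length - 1 - j) "" := by
  rw [List.getD_eq_getElem?_getD, List.getElem?_reverse (by simpa using hj),
    List.getElem?_eq_getElem (by omega),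
    List.getD_eq_getElem?_getD, List.getElem?_eq_getElem (show l.length - 1 - j < l.length by omega)]

-- suffix palindrome (axis in the right half), read on the reversed list ↔ mirror condition
lemma pvPal_high (model : List String) (s : Nat) (h2 : s < model.length)
    (h3 : model.length < 2 * s) :
    (∀ j, j < 2 * (model.length - s) →
        model.reverse.getD (2 * (model.length - s) - 1 - j) "" = model.reverse.getD j "") ↔
      pvGoodNat model s := by
  set n := model.length with hn
  constructor
  · intro hp d hd
    have hdn : d < n - s := by omega
    have := hp (n - s + d) (by omega)
    rw [pvRev_getD model _ (by omega), pvRev_getD model _ (by omega)] at this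
    have e1 : n - 1 - (2 * (n - s) - 1 - (n - s + d)) = s + d := by omega
    have e2 : n - 1 - (n - s + d) = s - 1 - d := by omega
    rw [e1, e2] at this
    exact this
  · intro hg j hj
    rw [pvRev_getD model _ (by omega), pvRev_getD model _ (by omega)]
    rcases Nat.lt_or_ge j (n - s) with hjl | hjl
    · have := hg (n - s - 1 - j) (by omega)
      have e1 : s + (n - s - 1 - j) = n - 1 - j := by omega
      have e2 : s - 1 - (n - s - 1 - j) = n - 1 - (2 * (n - s) - 1 - j) := by omega
      rw [e1, e2] at this
      exact this.symm
    · have := hg (j - (n - s)) (by omega)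
      have e1 : s + (j - (n - s)) = n - 1 - (2 * (n - s) - 1 - j) := by omega
      have e2 : s - 1 - (j - (n - s)) = n - 1 - j := by omega
      rw [e1, e2] at this
      exact this

lemma pvFindAxis_eq (n : Nat) (pref suf : List Bool) (p : Int → Bool)
    (hp : ∀ s : Nat, 1 ≤ s → s < n →
      p (s : Int) = (if 2 * s ≤ n then pref.getD s false else suf.getD (n - s) false)) :
    ∀ (fuel s : Nat), n - s ≤ fuel → 1 ≤ s →
    pvFindAxis n pref suf s = (PySem.List.pyRange (s : Int) (n : Int) 1).find? p := by
  intro fuel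
  induction fuel with
  | zero =>
    intro s hf h1
    have hsn : ¬ s < n := by omega
    rw [pvFindAxis, dif_neg hsn, PySem.List.pyRange_one_eq_nil (by omega), List.find?_nil]
  | succ fuel ih =>
    intro s hf h1
    by_cases hsn : s < n
    · rw [pvFindAxis, dif_pos hsn]
      dsimp only
      rw [PySem.List.pyRange_one_cons (by omega), List.find?_cons, hp s h1 hsn]
      cases hok : (if 2 * s ≤ n then pref.getD s false else suf.getD (n - s) false)
      · simp only [if_neg (by simp : ¬ (false = true))]
        rw [ih (s + 1) (by omega) (by omega)]
        norm_num
      · simp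
    · rw [pvFindAxis, dif_neg hsn, PySem.List.pyRange_one_eq_nil (by omega), List.find?_nil]

-- ===== VERDICT (by name: the statement is the Claim_ definition above) =====
theorem get_mirroring_index_spec : Claim_equal_get_mirroring_index := by
  intro model _
  unfold Spec_get_mirroring_index get_mirroring_index get_mirroring_index_alt
  dsimp only
  by_cases h0 : model.length = 0
  · have hmod : model = [] := List.eq_nil_of_length_eq_zero h0
    subst hmod
    rw [pvFindAxis, dif_neg (by omega)]
    simp [pvOuterA]
  · set n := model.length with hn
    set pref := pvEvenPal model with hpref
    set suf := pvEvenPal model.reverse with hsuf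
    set p : Int → Bool := fun s =>
      if 2 * s.toNat ≤ n then pref.getD s.toNat false else suf.getD (n - s.toNat) false
      with hpdef
    have hpred : ∀ s : Int, 1 ≤ s → s < (n : Int) →
        pvInnerA model (n : Int) s (model.length + 1) 1 false = p s := by
      intro s hs1 hs2
      have hsS : s = ((s.toNat : Nat) : Int) := by omega
      have hA := pvInnerA_true_iff model (n : Int) s (model.length + 1) 1 false
        ⟨by omega, by omega⟩ (by omega)
      have hGN : pvGood model (n : Int) s 1 ↔ pvGoodNat model s.toNat := by
        rw [hsS]
        exact pvGood_iff_goodNat model s.toNat (by omega) (by omega)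
      have hB : (p s = true) ↔ pvGoodNat model s.toNat := by
        rw [hpdef]
        dsimp only
        by_cases hc : 2 * s.toNat ≤ n
        · rw [if_pos hc, pvEvenPal_getD model s.toNat (by omega) hc]
          exact pvPal_low model s.toNat hc
        · rw [if_neg hc,
            pvEvenPal_getD model.reverse (n - s.toNat) (by omega)
              (by rw [List.length_reverse]; omega)]
          exact pvPal_high model s.toNat (by omega) (by omega)
      by_cases hg : pvGoodNat model s.toNat
      · rw [hA.mpr (hGN.mpr hg), hB.mpr hg]
      · rw [Bool.eq_false_iff.mpr (fun h => hg (hGN.mp (hA.mp h))),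
            Bool.eq_false_iff.mpr (fun h => hg (hB.mp h))]
    have step0 : pvOuterA model (n : Int) (model.length + 1) 0 false =
        pvOuterA model (n : Int) model.length 1 false := by
      rw [pvOuterA,
        if_pos (show (0 : Int) < (n : Int) ∧ (false : Bool) = false from ⟨by omega, rfl⟩)]
      rw [pvInnerA_stop model (n : Int) 0 (model.length + 1) 1 false (by omega) (by omega)]
      norm_num
    rw [step0, pvOuterA_find model p hpred model.length 1 (by omega) (by omega) (by omega)]
    rw [pvFindAxis_eq n pref suf p
      (fun s _ _ => by rw [hpdef]; simp) n 1 (by omega) (by omega)]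
    cases hfind : (PySem.List.pyRange ((1 : Nat) : Int) (n : Int) 1).find? p with
    | none => simp
    | some t => simp
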